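-- pv_equiv track=rewrite | github.com/HatsuSumi/Serendipity | project_stats.py | strip_html_comments
-- ===== SOURCE A (Python) =====
-- from typing import Dict, Iterable, List, Optional, Tuple, Callable
--
-- def strip_html_comments(text: str) -> str:
--     out: List[str] = []
--     i = 0
--     n = len(text)
--     in_comment = False
--
--     while i < n:
--         if not in_comment and text.startswith("<!--", i):
--             in_comment = True
--             i += 4
--             continue
--         if in_comment and text.startswith("-->", i):
--             in_comment = False
--             i += 3
--             continue
--         ch = text[i]
--         if in_comment:
--             if ch == "\n":
--                 out.append("\n")
--             i += 1
--             continue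
--         out.append(ch)
--         i += 1
--
--     return "".join(out)
-- ===== SOURCE B (Python) =====
-- def strip_html_comments(text: str) -> str:
--     parts = []
--     pos = 0
--     n = len(text)
--     while True:
--         start = text.find('<!--', pos)
--         if start == -1:
--             parts.append(text[pos:])
--             break
--         parts.append(text[pos:start])
--         end = text.find('-->', start + 4)
--         if end == -1:
--             parts.append('\n' * text.count('\n', start + 4, n))
--             break
--         parts.append('\n' * text.count('\n', start + 4, end))
--         pos = end + 3
--     return ''.join(parts)
-- ===== Notes on version B (the rewrite author's own statement) =====
-- stated objective: faster
-- what changed: Replaces A's char-by-char state machine (index plus in_comment flag, appending one character at a time) with a block-wise scan that locates each comment opener and closer with str.find, slices whole non-comment regions at once, and counts newlines inside each comment with one str.count call.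
import Mathlib
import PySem

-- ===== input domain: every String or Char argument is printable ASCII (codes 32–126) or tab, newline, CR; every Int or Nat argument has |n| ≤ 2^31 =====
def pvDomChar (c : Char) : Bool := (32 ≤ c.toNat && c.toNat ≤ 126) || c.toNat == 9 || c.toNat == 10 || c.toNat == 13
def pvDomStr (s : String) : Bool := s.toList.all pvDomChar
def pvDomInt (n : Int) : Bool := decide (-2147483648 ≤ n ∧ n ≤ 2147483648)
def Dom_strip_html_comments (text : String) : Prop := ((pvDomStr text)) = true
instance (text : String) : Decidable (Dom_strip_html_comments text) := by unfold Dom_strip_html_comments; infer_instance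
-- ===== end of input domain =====

-- B strips comments block-wise (find/slice/newline-count) instead of A's char-by-char state machine; objective: faster (constant factor).

-- ===== PORT A =====
-- A's while loop: index i, in_comment flag; here as structural recursion on the char list
-- (startswith at i = pattern isPrefixOf the remaining list).
def stripA : List Char → Bool → List Char
  | [], _ => []
  | c :: rest, inc =>
    if ¬inc ∧ ['<','!','-','-'].isPrefixOf (c :: rest) then
      stripA ((c :: rest).drop 4) true
    else if inc ∧ ['-','-','>'].isPrefixOf (c :: rest) then
      stripA ((c :: rest).drop 3) false
    else if inc then
      (if c = '\n' then ['\n'] else []) ++ stripA rest true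
    else
      c :: stripA rest false
termination_by l _ => l.length
decreasing_by all_goals (simp; try omega)

def strip_html_comments (text : String) : String :=
  String.mk (stripA text.toList false)

-- ===== PORT B =====
-- str.find(pat, pos): first index where pat occurs, as an Option over the suffix.
def findSub : List Char → List Char → Option Nat
  | pat, [] => if pat = [] then some 0 else none
  | pat, c :: rest =>
    if pat.isPrefixOf (c :: rest) then some 0
    else (findSub pat rest).map (· + 1)

theorem findSub_le {pat l : List Char} {s : Nat} (h : findSub pat l = some s) :
    s + pat.length ≤ l.length := by
  induction l generalizing s with
  | nil =>
    simp [findSub] at h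
    obtain ⟨hp, hs⟩ := h
    simp [hp, ← hs]
  | cons c rest ih =>
    simp only [findSub] at h
    split at h
    · rename_i hp
      have := (List.isPrefixOf_iff_prefix.mp hp).length_le
      simp at h
      omega
    · simp [Option.map_eq_some_iff] at h
      obtain ⟨s', hs', rfl⟩ := h
      have := ih hs'
      simp; omega

-- B: find '<!--'; copy the gap wholesale; find '-->'; emit one '\n' per newline inside the
-- comment body; continue after '-->' (or stop at an unterminated comment).
def stripB (l : List Char) : List Char :=
  match h1 : findSub ['<','!','-','-'] l with
  | none => l
  | some s =>
    match h2 : findSub ['-','-','>'] (l.drop (s+4)) with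
    | none => l.take s ++ List.replicate ((l.drop (s+4)).count '\n') '\n'
    | some e =>
        l.take s ++ List.replicate (((l.drop (s+4)).take e).count '\n') '\n'
          ++ stripB ((l.drop (s+4)).drop (e+3))
termination_by l.length
decreasing_by
  have h1' := findSub_le h1
  have h2' := findSub_le h2
  simp at h1' h2' ⊢
  omega

def strip_html_comments_alt (text : String) : String :=
  String.mk (stripB text.toList)

-- ===== PRECONDITION & SPEC =====
def Spec_strip_html_comments (text : String) (out : String) : Prop := out = strip_html_comments_alt text
instance (text : String) (out : String) : Decidable (Spec_strip_html_comments text out) := by unfold Spec_strip_html_comments; infer_instance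

-- ===== CLAIM (what is proved, stated in full; the proofs are below) =====
def Claim_equal_strip_html_comments : Prop := ∀ (text : String), Dom_strip_html_comments text → Spec_strip_html_comments text (strip_html_comments text)

-- ===== LEMMAS AND PROOFS =====

-- A's out-of-comment scan, characterised by the first occurrence of '<!--'.
theorem stripA_false (l : List Char) :
    stripA l false =
      match findSub ['<','!','-','-'] l with
      | none => l
      | some s => l.take s ++ stripA (l.drop (s+4)) true := by
  induction l with
  | nil => simp [stripA, findSub]
  | cons c rest ih =>
    by_cases hp : (['<','!','-','-'] : List Char).isPrefixOf (c :: rest)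
    · simp [stripA, findSub, hp]
    · rw [show stripA (c :: rest) false = c :: stripA rest false by
        rw [stripA]; simp [hp]]
      simp only [findSub, hp, if_false, if_neg hp]
      rw [ih]
      cases hf : findSub ['<','!','-','-'] rest <;> simp [hf, List.take_succ_cons, List.drop_succ_cons]

-- A's in-comment scan, characterised by the first occurrence of '-->'.
theorem stripA_true (l : List Char) :
    stripA l true =
      match findSub ['-','-','>'] l with
      | none => List.replicate (l.count '\n') '\n'
      | some e => List.replicate ((l.take e).count '\n') '\n' ++ stripA (l.drop (e+3)) false := by
  induction l with
  | nil => simp [stripA, findSub]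
  | cons c rest ih =>
    by_cases hp : (['-','-','>'] : List Char).isPrefixOf (c :: rest)
    · simp [stripA, findSub, hp]
    · rw [show stripA (c :: rest) true
            = (if c = '\n' then ['\n'] else []) ++ stripA rest true by
        rw [stripA]; simp [hp]]
      simp only [findSub, if_neg hp]
      rw [ih]
      cases hf : findSub ['-','-','>'] rest with
      | none =>
        by_cases hc : c = '\n' <;>
          simp [hf, hc, List.count_cons, List.replicate_succ]
      | some e =>
        by_cases hc : c = '\n' <;>
          simp [hf, hc, List.take_succ_cons, List.drop_succ_cons, List.count_cons,
            List.replicate_succ]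

theorem stripB_eq_stripA (l : List Char) : stripB l = stripA l false := by
  rw [stripB, stripA_false]
  cases h1 : findSub ['<','!','-','-'] l with
  | none => rfl
  | some s =>
    simp only
    rw [stripA_true]
    cases h2 : findSub ['-','-','>'] (l.drop (s+4)) with
    | none => rfl
    | some e =>
      simp only [List.append_assoc]
      rw [stripB_eq_stripA]
termination_by l.length
decreasing_by
  have h1' := findSub_le h1
  have h2' := findSub_le h2
  simp at h1' h2' ⊢
  omega

-- ===== VERDICT (by name: the statement is the Claim_ definition above) =====
theorem strip_html_comments_spec : Claim_equal_strip_html_comments := by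
  intro text _
  unfold Spec_strip_html_comments strip_html_comments strip_html_comments_alt
  rw [stripB_eq_stripA]
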